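-- pv_equiv track=rewrite | github.com/braydentodd/the-glass-data-pipeline | lib/sheets.py | _get_section_boundaries
-- ===== SOURCE A (Python) =====
-- from typing import Dict, List, Optional, Any, Tuple
--
-- def _get_section_boundaries(columns_list: List[Tuple]) -> List[int]:
--     """Get column indices where sections change (for vertical borders).
--     Skips the boundary after the 'entities' section — entities gets no right border."""
--     boundaries = []
--     prev_section = None
--     for idx, entry in enumerate(columns_list):
--         col_ctx = entry[3] if len(entry) > 3 else None
--         if col_ctx != prev_section and prev_section is not None:
--             # Skip the border between entities and the next section
--             if prev_section != 'entities':
--                 boundaries.append(idx)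
--         prev_section = col_ctx
--     return boundaries
-- ===== SOURCE B (Python) =====
-- def _get_section_boundaries(columns_list):
--     """B: run-length-encode the per-column section contexts into (value, count)
--     runs, then emit the cumulative run lengths as boundaries, skipping the
--     boundary after an 'entities' run (the last run ends no boundary)."""
--     contexts = [entry[3] if len(entry) > 3 else None for entry in columns_list]
--     runs = _rle(contexts)
--     boundaries = []
--     pos = 0
--     for value, count in runs[:-1]:
--         pos += count
--         if value != 'entities':
--             boundaries.append(pos)
--     return boundaries
--
--
-- def _rle(xs):
--     """Run-length encoding: consecutive equal values collapsed to [value, count]."""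
--     runs = []
--     for x in xs:
--         if runs and runs[-1][0] == x:
--             runs[-1][1] += 1
--         else:
--             runs.append([x, 1])
--     return runs
-- ===== Notes on version B (the rewrite author's own statement) =====
-- stated objective: alternative
-- what changed: Replaces the stateful prev_section scan with a run-length-encoding pipeline: collapse the contexts into (value,count) runs, then output the cumulative run lengths (prefix sums) of all but the last run, skipping runs whose value is 'entities'.
import Mathlib
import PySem

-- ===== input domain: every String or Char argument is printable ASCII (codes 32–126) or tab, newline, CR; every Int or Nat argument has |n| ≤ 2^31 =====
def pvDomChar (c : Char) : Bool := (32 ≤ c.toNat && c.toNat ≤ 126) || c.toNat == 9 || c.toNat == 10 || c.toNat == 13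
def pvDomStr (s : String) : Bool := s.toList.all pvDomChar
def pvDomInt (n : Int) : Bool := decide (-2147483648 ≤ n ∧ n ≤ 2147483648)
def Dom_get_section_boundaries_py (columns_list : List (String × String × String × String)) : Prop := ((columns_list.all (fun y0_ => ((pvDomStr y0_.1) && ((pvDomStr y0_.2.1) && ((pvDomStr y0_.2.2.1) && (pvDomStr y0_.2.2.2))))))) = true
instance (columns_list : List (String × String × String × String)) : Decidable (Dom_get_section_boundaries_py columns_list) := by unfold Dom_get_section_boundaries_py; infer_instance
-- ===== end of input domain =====

-- B replaces A's stateful prev_section scan with a run-length-encoding pipeline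
-- (runs of equal contexts, then prefix sums of the run lengths); same O(n) cost.

-- ===== PORT A =====
-- the Python for-loop with its (boundaries, prev_section) state, as structural recursion;
-- entries are 4-tuples here, so the 'if len(entry) > 3' test always takes entry[3]
def get_section_boundaries_py_loop (columns_list : List (String × String × String × String))
    (idx : Int) (prev_section : Option String) (boundaries : List Int) : List Int :=
  match columns_list with
  | [] => boundaries
  | entry :: rest =>
    let col_ctx := entry.2.2.2
    let boundaries' :=
      if some col_ctx ≠ prev_section ∧ prev_section ≠ none then
        if prev_section ≠ some "entities" then boundaries ++ [idx] else boundaries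
      else boundaries
    get_section_boundaries_py_loop rest (idx + 1) (some col_ctx) boundaries'

def get_section_boundaries_py (columns_list : List (String × String × String × String)) : List Int :=
  get_section_boundaries_py_loop columns_list 0 none []

-- ===== PORT B =====
-- Python's _rle loop: 'runs' kept head-first (reversed) so mutating runs[-1] is a head update
def pvRleStep (runs : List (String × Int)) (x : String) : List (String × Int) :=
  match runs with
  | (y, n) :: rest => if y = x then (y, n + 1) :: rest else (x, 1) :: (y, n) :: rest
  | [] => [(x, 1)]

def get_section_boundaries_py_alt (columns_list : List (String × String × String × String)) : List Int :=
  let contexts := columns_list.map (fun entry => entry.2.2.2)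
  let runs := (contexts.foldl pvRleStep []).reverse
  -- the boundary pass over runs[:-1] with its (pos, boundaries) state
  (runs.dropLast.foldl
    (fun (st : Int × List Int) kn =>
      let pos := st.1 + kn.2
      (pos, if kn.1 ≠ "entities" then st.2 ++ [pos] else st.2))
    (0, [])).2

-- ===== PRECONDITION & SPEC =====
def Spec_get_section_boundaries_py (columns_list : List (String × String × String × String)) (out : List Int) : Prop := out = get_section_boundaries_py_alt columns_list
instance (columns_list : List (String × String × String × String)) (out : List Int) : Decidable (Spec_get_section_boundaries_py columns_list out) := by unfold Spec_get_section_boundaries_py; infer_instance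

-- ===== CLAIM (what is proved, stated in full; the proofs are below) =====
def Claim_equal_get_section_boundaries_py : Prop := ∀ (columns_list : List (String × String × String × String)), Dom_get_section_boundaries_py columns_list → Spec_get_section_boundaries_py columns_list (get_section_boundaries_py columns_list)

-- ===== LEMMAS AND PROOFS =====

-- common normal form: boundaries emitted when scanning cs with previous context p and first index i
def pvBnd (i : Int) (p : String) : List String → List Int
  | [] => []
  | c :: cs => (if c ≠ p ∧ p ≠ "entities" then [i] else []) ++ pvBnd (i + 1) c cs

theorem aLoop_eq_bnd (cs : List (String × String × String × String)) :
    ∀ (i : Int) (p : String) (acc : List Int),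
    get_section_boundaries_py_loop cs i (some p) acc
      = acc ++ pvBnd i p (cs.map (fun e => e.2.2.2)) := by
  induction cs with
  | nil => intro i p acc; simp [get_section_boundaries_py_loop, pvBnd]
  | cons e rest ih =>
    intro i p acc
    simp only [get_section_boundaries_py_loop, List.map_cons, pvBnd]
    by_cases h1 : e.2.2.2 = p
    · subst h1; simp [ih]
    · by_cases h2 : p = "entities" <;> simp [h1, h2, ih, List.append_assoc]

-- the run list in natural order, as a front-emitting recursion
def pvRuns (y : String) (n : Int) : List String → List (String × Int)
  | [] => [(y, n)]
  | x :: xs => if x = y then pvRuns y (n + 1) xs else (y, n) :: pvRuns x 1 xs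

theorem foldl_rleStep_append (cs : List String) :
    ∀ (y : String) (n : Int) (rs : List (String × Int)),
    cs.foldl pvRleStep ((y, n) :: rs) = cs.foldl pvRleStep [(y, n)] ++ rs := by
  induction cs with
  | nil => intro y n rs; simp
  | cons x xs ih =>
    intro y n rs
    simp only [List.foldl_cons, pvRleStep]
    by_cases h : y = x
    · rw [if_pos h, if_pos h]
      exact ih y (n + 1) rs
    · rw [if_neg h, if_neg h]
      rw [ih x 1 ((y, n) :: rs), ih x 1 [(y, n)], List.append_assoc]
      rfl

theorem rle_eq_runs (cs : List String) :
    ∀ (y : String) (n : Int),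
    (cs.foldl pvRleStep [(y, n)]).reverse = pvRuns y n cs := by
  induction cs with
  | nil => intro y n; simp [pvRuns]
  | cons x xs ih =>
    intro y n
    simp only [List.foldl_cons, pvRleStep, pvRuns]
    by_cases h : y = x
    · rw [if_pos h, if_pos h.symm]
      exact ih y (n + 1)
    · have hx : ¬ x = y := fun hh => h hh.symm
      rw [if_neg h, if_neg hx, foldl_rleStep_append, List.reverse_append, ih]
      simp

theorem pvRuns_ne_nil (cs : List String) (y : String) (n : Int) : pvRuns y n cs ≠ [] := by
  cases cs with
  | nil => simp [pvRuns]
  | cons x xs =>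
    simp only [pvRuns]
    split <;> simp [pvRuns_ne_nil]

-- the boundary-pass step of B's fold, named so the induction below reads cleanly
def pvStep (st : Int × List Int) (kn : String × Int) : Int × List Int :=
  (st.1 + kn.2, if kn.1 ≠ "entities" then st.2 ++ [st.1 + kn.2] else st.2)

theorem pass_runs_eq_bnd (cs : List String) :
    ∀ (y : String) (n pos : Int) (acc : List Int),
    ((pvRuns y n cs).dropLast.foldl pvStep (pos, acc)).2
      = acc ++ pvBnd (pos + n) y cs := by
  induction cs with
  | nil => intro y n pos acc; simp [pvRuns, pvBnd]
  | cons x xs ih =>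
    intro y n pos acc
    simp only [pvRuns]
    by_cases h : x = y
    · subst h
      rw [if_pos rfl, ih]
      have e1 : pos + (n + 1) = pos + n + 1 := by ring
      simp [pvBnd, e1]
    · rw [if_neg h, List.dropLast_cons_of_ne_nil (pvRuns_ne_nil xs x 1), List.foldl_cons]
      simp only [pvStep]
      by_cases h2 : y = "entities"
      · rw [if_neg (not_not_intro h2), ih]
        simp [pvBnd, h2]
      · rw [if_pos h2, ih]
        simp [pvBnd, h, h2, List.append_assoc]

-- ===== VERDICT (by name: the statement is the Claim_ definition above) =====
theorem get_section_boundaries_py_spec : Claim_equal_get_section_boundaries_py := by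
  intro columns_list _
  unfold Spec_get_section_boundaries_py get_section_boundaries_py get_section_boundaries_py_alt
  cases columns_list with
  | nil => simp [get_section_boundaries_py_loop]
  | cons e rest =>
    simp only [get_section_boundaries_py_loop, List.map_cons, List.foldl_cons, pvRleStep]
    rw [if_neg (by simp), aLoop_eq_bnd, rle_eq_runs]
    have h := pass_runs_eq_bnd (rest.map (fun e => e.2.2.2)) e.2.2.2 1 0 []
    simp only [List.nil_append, zero_add] at h ⊢
    exact h.symm
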